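-- pv_equiv track=rewrite | github.com/rhemanth832/DSA-with-Python-Daily-Practice | 33.array by pos,neg.py | rearrange_ns
-- ===== SOURCE A (Python) =====
-- def rearrange_ns(nums):
--     pos=[x for x in nums if x>=0]
--     neg=[x for x in nums if x<0]
--     result=[]
--
--     for p, n in zip(pos, neg):
--         result.append(p)
--         result.append(n)
--         # print remaining
--     result.extend(pos[len(neg):])
--     result.extend(neg[len(pos):])
--
--     return result
-- ===== SOURCE B (Python) =====
-- def rearrange_ns(nums):
--     # Schedule-key approach: the k-th non-negative gets key 2k, the k-th
--     # negative key 2k+1; a stable sort by key yields the alternating order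
--     # with leftovers at the end (all leftover keys exceed the paired keys).
--     keyed = []
--     cp = cn = 0
--     for x in nums:
--         if x >= 0:
--             keyed.append((2 * cp, x))
--             cp += 1
--         else:
--             keyed.append((2 * cn + 1, x))
--             cn += 1
--     keyed.sort(key=lambda t: t[0])
--     return [x for _, x in keyed]
-- ===== Notes on version B (the rewrite author's own statement) =====
-- stated objective: alternative
-- what changed: Instead of partitioning into pos/neg lists and interleaving them, B assigns each element a schedule key in one pass (k-th non-negative gets 2k, k-th negative gets 2k+1) and sorts by key, recovering the alternating order with leftovers naturally at the end.
import Mathlib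
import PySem

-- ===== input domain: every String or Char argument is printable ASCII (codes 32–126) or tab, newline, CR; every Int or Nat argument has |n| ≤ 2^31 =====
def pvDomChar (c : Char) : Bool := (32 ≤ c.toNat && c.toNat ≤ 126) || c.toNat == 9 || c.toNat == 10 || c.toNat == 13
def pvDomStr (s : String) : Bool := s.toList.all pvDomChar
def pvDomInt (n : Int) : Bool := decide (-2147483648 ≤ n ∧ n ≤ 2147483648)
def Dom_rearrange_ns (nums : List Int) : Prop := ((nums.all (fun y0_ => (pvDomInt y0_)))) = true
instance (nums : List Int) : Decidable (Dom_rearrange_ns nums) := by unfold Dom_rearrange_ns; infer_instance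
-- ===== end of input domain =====

-- B replaces A's partition-then-interleave with a schedule-key construction: each element
-- gets a key (2k for the k-th non-negative, 2k+1 for the k-th negative) and a sort by key
-- produces the alternating arrangement; a genuinely different algorithm, not faster.

-- ===== PORT A =====
def rearrange_ns (nums : List Int) : List Int :=
  let pos := nums.filter (fun x => 0 ≤ x)
  let neg := nums.filter (fun x => x < 0)
  let result : List Int := []
  let result := (pos.zip neg).foldl (fun r pn => (r ++ [pn.1]) ++ [pn.2]) result
  let result := result ++ pos.drop neg.length
  let result := result ++ neg.drop pos.length
  result

-- ===== PORT B =====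
def rearrange_ns_alt (nums : List Int) : List Int :=
  let st := nums.foldl
    (fun (st : List (Int × Int) × Int × Int) x =>
      if 0 ≤ x then (st.1 ++ [(2 * st.2.1, x)], st.2.1 + 1, st.2.2)
      else (st.1 ++ [(2 * st.2.2 + 1, x)], st.2.1, st.2.2 + 1))
    ([], 0, 0)
  let keyed := PySem.List.sorted st.1 (fun t => t.1) false
  keyed.map (fun t => t.2)

-- ===== PRECONDITION & SPEC =====
def Spec_rearrange_ns (nums : List Int) (out : List Int) : Prop := out = rearrange_ns_alt nums
instance (nums : List Int) (out : List Int) : Decidable (Spec_rearrange_ns nums out) := by unfold Spec_rearrange_ns; infer_instance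

-- ===== CLAIM (what is proved, stated in full; the proofs are below) =====
def Claim_equal_rearrange_ns : Prop := ∀ (nums : List Int), Dom_rearrange_ns nums → Spec_rearrange_ns nums (rearrange_ns nums)

-- ===== LEMMAS AND PROOFS =====

-- recursive form of B's keyed-list construction
def keyedOf : List Int → Int → Int → List (Int × Int)
  | [], _, _ => []
  | x :: t, cp, cn =>
      if 0 ≤ x then (2 * cp, x) :: keyedOf t (cp + 1) cn
      else (2 * cn + 1, x) :: keyedOf t cp (cn + 1)

-- the non-negatives keyed 2c, 2(c+1), … and the negatives keyed 2c+1, 2(c+1)+1, …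
def evens : List Int → Int → List (Int × Int)
  | [], _ => []
  | p :: ps, c => (2 * c, p) :: evens ps (c + 1)

def odds : List Int → Int → List (Int × Int)
  | [], _ => []
  | n :: ns, c => (2 * c + 1, n) :: odds ns (c + 1)

-- the strictly key-increasing arrangement: alternate, then the leftover run
def mergeT : List Int → List Int → Int → List (Int × Int)
  | [], ns, c => odds ns c
  | p :: ps, [], c => evens (p :: ps) c
  | p :: ps, n :: ns, c => (2 * c, p) :: (2 * c + 1, n) :: mergeT ps ns (c + 1)

theorem foldl_keyed (nums : List Int) : ∀ (acc : List (Int × Int)) (cp cn : Int),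
    (nums.foldl
      (fun (st : List (Int × Int) × Int × Int) x =>
        if 0 ≤ x then (st.1 ++ [(2 * st.2.1, x)], st.2.1 + 1, st.2.2)
        else (st.1 ++ [(2 * st.2.2 + 1, x)], st.2.1, st.2.2 + 1))
      (acc, cp, cn)).1 = acc ++ keyedOf nums cp cn := by
  induction nums with
  | nil => intro acc cp cn; simp [keyedOf]
  | cons x t ih =>
      intro acc cp cn
      by_cases hx : 0 ≤ x <;> simp [keyedOf, hx, ih, List.append_assoc]

theorem keyedOf_perm (nums : List Int) : ∀ (cp cn : Int),
    (keyedOf nums cp cn).Perm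
      (evens (nums.filter (fun x => 0 ≤ x)) cp ++ odds (nums.filter (fun x => x < 0)) cn) := by
  induction nums with
  | nil =>
      intro cp cn
      simp only [keyedOf, List.filter_nil, evens, odds, List.nil_append]
      exact List.Perm.refl _
  | cons x t ih =>
      intro cp cn
      by_cases hx : 0 ≤ x
      · have hneg : ¬ x < 0 := by omega
        simp only [keyedOf, hx, if_pos, List.filter_cons,
          decide_eq_false hneg]
        simpa [evens] using (ih (cp + 1) cn).cons (2 * cp, x)
      · have hneg : x < 0 := by omega
        simp only [keyedOf, hx, List.filter_cons,
          decide_eq_true hneg, if_false]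
        have h1 : ((2 * cn + 1, x) :: keyedOf t cp (cn + 1)).Perm
            ((2 * cn + 1, x) :: (evens (t.filter (fun x => 0 ≤ x)) cp ++
              odds (t.filter (fun x => x < 0)) (cn + 1))) := (ih cp (cn + 1)).cons _
        refine h1.trans ?_
        simpa [odds] using (List.perm_middle
          (a := (2 * cn + 1, x))
          (l₁ := evens (t.filter (fun x => 0 ≤ x)) cp)
          (l₂ := odds (t.filter (fun x => x < 0)) (cn + 1))).symm

theorem mergeT_perm (ps : List Int) : ∀ (ns : List Int) (c : Int),
    (mergeT ps ns c).Perm (evens ps c ++ odds ns c) := by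
  induction ps with
  | nil => intro ns c; simp only [mergeT, evens, List.nil_append]; exact List.Perm.refl _
  | cons p pt ih =>
      intro ns c
      cases ns with
      | nil => simp only [mergeT, odds, List.append_nil]; exact List.Perm.refl _
      | cons n nt =>
          simp only [mergeT, evens, odds, List.cons_append]
          refine List.Perm.cons _ ?_
          refine ((ih nt (c + 1)).cons _).trans ?_
          exact (List.perm_middle (a := (2 * c + 1, n))
            (l₁ := evens pt (c + 1)) (l₂ := odds nt (c + 1))).symm

theorem mem_evens_key (ps : List Int) : ∀ (c : Int) (q : Int × Int), q ∈ evens ps c → 2 * c ≤ q.1 := by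
  induction ps with
  | nil => intro c q h; simp [evens] at h
  | cons p pt ih =>
      intro c q h
      simp only [evens, List.mem_cons] at h
      rcases h with h | h
      · simp [h]
      · have := ih (c + 1) q h; omega

theorem mem_odds_key (ns : List Int) : ∀ (c : Int) (q : Int × Int), q ∈ odds ns c → 2 * c + 1 ≤ q.1 := by
  induction ns with
  | nil => intro c q h; simp [odds] at h
  | cons n nt ih =>
      intro c q h
      simp only [odds, List.mem_cons] at h
      rcases h with h | h
      · simp [h]
      · have := ih (c + 1) q h; omega

theorem mem_mergeT_key (ps : List Int) : ∀ (ns : List Int) (c : Int) (q : Int × Int),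
    q ∈ mergeT ps ns c → 2 * c ≤ q.1 := by
  induction ps with
  | nil =>
      intro ns c q h
      have := mem_odds_key ns c q (by simpa [mergeT] using h); omega
  | cons p pt ih =>
      intro ns c q h
      cases ns with
      | nil => exact mem_evens_key (p :: pt) c q (by simpa [mergeT] using h)
      | cons n nt =>
          simp only [mergeT, List.mem_cons] at h
          rcases h with h | h | h
          · simp [h]
          · simp [h]
          · have := ih nt (c + 1) q h; omega

theorem evens_pairwise (ps : List Int) : ∀ (c : Int),
    (evens ps c).Pairwise (fun a b => a.1 < b.1) := by
  induction ps with
  | nil => intro c; simp [evens]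
  | cons p pt ih =>
      intro c
      refine List.Pairwise.cons (fun q hq => ?_) (ih (c + 1))
      have := mem_evens_key pt (c + 1) q hq; simp; omega

theorem odds_pairwise (ns : List Int) : ∀ (c : Int),
    (odds ns c).Pairwise (fun a b => a.1 < b.1) := by
  induction ns with
  | nil => intro c; simp [odds]
  | cons n nt ih =>
      intro c
      refine List.Pairwise.cons (fun q hq => ?_) (ih (c + 1))
      have := mem_odds_key nt (c + 1) q hq; simp; omega

theorem mergeT_pairwise (ps : List Int) : ∀ (ns : List Int) (c : Int),
    (mergeT ps ns c).Pairwise (fun a b => a.1 < b.1) := by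
  induction ps with
  | nil => intro ns c; simpa [mergeT] using odds_pairwise ns c
  | cons p pt ih =>
      intro ns c
      cases ns with
      | nil => simpa [mergeT] using evens_pairwise (p :: pt) c
      | cons n nt =>
          refine List.Pairwise.cons (fun q hq => ?_) (List.Pairwise.cons (fun q hq => ?_) (ih nt (c + 1)))
          · simp only [List.mem_cons] at hq
            rcases hq with h | h
            · simp [h]
            · have := mem_mergeT_key pt nt (c + 1) q h; simp; omega
          · have := mem_mergeT_key pt nt (c + 1) q hq; simp; omega

theorem map_snd_evens (ps : List Int) : ∀ (c : Int), (evens ps c).map (fun t => t.2) = ps := by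
  induction ps with
  | nil => intro c; simp [evens]
  | cons p pt ih => intro c; simp [evens, ih]

theorem map_snd_odds (ns : List Int) : ∀ (c : Int), (odds ns c).map (fun t => t.2) = ns := by
  induction ns with
  | nil => intro c; simp [odds]
  | cons n nt ih => intro c; simp [odds, ih]

-- projecting the merged schedule gives exactly A's zip-interleave plus the two tails
theorem map_snd_mergeT (ps : List Int) : ∀ (ns : List Int) (c : Int),
    (mergeT ps ns c).map (fun t => t.2) =
      (ps.zip ns).flatMap (fun pn => [pn.1, pn.2]) ++ ps.drop ns.length ++ ns.drop ps.length := by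
  induction ps with
  | nil => intro ns c; simp [mergeT, map_snd_odds]
  | cons p pt ih =>
      intro ns c
      cases ns with
      | nil => simp [mergeT, map_snd_evens]
      | cons n nt =>
          simp only [mergeT, List.map_cons, ih nt (c + 1), List.zip_cons_cons,
            List.flatMap_cons, List.length_cons, List.drop_succ_cons, List.cons_append,
            List.nil_append, List.append_assoc]

-- ===== VERDICT (by name: the statement is the Claim_ definition above) =====
theorem rearrange_ns_spec : Claim_equal_rearrange_ns := by
  intro nums _
  unfold Spec_rearrange_ns rearrange_ns rearrange_ns_alt
  set pos := nums.filter (fun x => 0 ≤ x) with hpos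
  set neg := nums.filter (fun x => x < 0) with hneg
  have hsorted : PySem.List.sorted (keyedOf nums 0 0) (fun t => t.1) false = mergeT pos neg 0 := by
    exact PySem.List.sorted_eq_of_perm_of_pairwise_lt _ _ _
      ((mergeT_perm pos neg 0).trans (keyedOf_perm nums 0 0).symm) (mergeT_pairwise pos neg 0)
  simp only [foldl_keyed nums [] 0 0, List.nil_append, hsorted,
    PySem.List.foldl_append_eq_flatMap, map_snd_mergeT, List.append_assoc]
  simp
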